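-- pv_equiv track=rewrite | github.com/Frosselet/pdf-ocr | src/pdf_ocr/interpret.py | _count_pipe_data_rows
-- ===== SOURCE A (Python) =====
-- def _count_pipe_data_rows(compressed_text: str) -> int:
--     """Count pipe-table data rows (excluding aggregation rows).
--
--     Walks through *compressed_text* looking for ``|---|`` separators that mark
--     the start of data rows, then counts subsequent pipe rows whose first cell
--     is non-empty (i.e. not aggregation ``||`` rows).
--     """
--     total = 0
--     in_data = False
--     for line in compressed_text.split("\n"):
--         s = line.strip()
--         if s.startswith("|---"):
--             in_data = True
--             continue
--         if in_data:
--             if s.startswith("|") and s: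
--                 if not s.startswith("||"):
--                     total += 1
--             else:
--                 in_data = False
--     return total
-- ===== SOURCE B (Python) =====
-- def _first_sep_index(run):
--     for i, ln in enumerate(run):
--         if ln.startswith("|---"):
--             return i
--     return None
--
--
-- def _count_pipe_data_rows(compressed_text: str) -> int:
--     """Count pipe-table data rows via staged passes: group stripped lines into
--     maximal runs of '|'-prefixed lines, then sum per run the data lines after
--     the run's first '|---' separator."""
--     lines = [ln.strip() for ln in compressed_text.split("\n")]
--     runs, cur = [], []
--     for ln in lines:
--         if ln.startswith("|"):
--             cur.append(ln)
--         elif cur: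
--             runs.append(cur)
--             cur = []
--     if cur:
--         runs.append(cur)
--     total = 0
--     for run in runs:
--         k = _first_sep_index(run)
--         if k is not None:
--             total += sum(1 for ln in run[k + 1:]
--                          if not ln.startswith("||") and not ln.startswith("|---"))
--     return total
-- ===== Notes on version B (the rewrite author's own statement) =====
-- stated objective: alternative
-- what changed: Replaces A's single-pass boolean state machine with staged passes: first materialise the maximal runs of '|'-prefixed stripped lines as a list of groups, then for each run locate its first '|---' separator and count the non-'||'/non-'|---' lines after it; the in_data flag disappears.
import Mathlib
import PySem

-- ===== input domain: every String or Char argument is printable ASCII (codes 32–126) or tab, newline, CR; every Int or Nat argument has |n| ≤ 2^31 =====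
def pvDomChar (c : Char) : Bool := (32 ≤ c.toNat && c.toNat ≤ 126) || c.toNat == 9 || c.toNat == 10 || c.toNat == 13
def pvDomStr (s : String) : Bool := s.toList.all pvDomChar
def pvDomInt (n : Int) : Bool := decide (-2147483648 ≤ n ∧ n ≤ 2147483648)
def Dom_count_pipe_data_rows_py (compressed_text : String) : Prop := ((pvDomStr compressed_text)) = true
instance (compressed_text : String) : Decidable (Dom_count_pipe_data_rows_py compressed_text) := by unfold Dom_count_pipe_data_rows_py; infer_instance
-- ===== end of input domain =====

-- B restructures A's flag-carrying single pass into staged passes: group stripped lines into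
-- maximal runs of '|'-prefixed lines, then per run count the data lines after its first '|---'
-- separator (alternative decomposition, same cost).


-- ===== PORT A =====
-- A's loop body: state (total, in_data); the line is stripped inside the loop.
def pvStepA (st : Int × Bool) (line : List Char) : Int × Bool :=
  let s := PySem.Chars.strip line
  if PySem.Chars.startswith s "|---".toList then (st.1, true)
  else if st.2 then
    if PySem.Chars.startswith s "|".toList && !s.isEmpty then
      if !(PySem.Chars.startswith s "||".toList) then (st.1 + 1, st.2) else st
    else (st.1, false)
  else st

def count_pipe_data_rows_py (compressed_text : String) : Int :=
  ((PySem.Chars.splitOn compressed_text.toList "\n".toList).foldl pvStepA (0, false)).1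

-- ===== PORT B =====
-- _first_sep_index: index of the first '|---' line in a run, None if absent
def pvFirstSepIdx : List (List Char) → Option Nat
  | [] => none
  | l :: rest =>
    if PySem.Chars.startswith l "|---".toList then some 0
    else (pvFirstSepIdx rest).map (· + 1)

-- the per-run body of B's second loop
def pvRunCount (run : List (List Char)) : Int :=
  match pvFirstSepIdx run with
  | none => 0
  | some k =>
    ((PySem.List.slice run (some ((k : Int) + 1)) none).countP
      (fun ln => !(PySem.Chars.startswith ln "||".toList) &&
                 !(PySem.Chars.startswith ln "|---".toList)) : Int)

-- B's first loop body: state (runs, cur)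
def pvStepRuns (st : List (List (List Char)) × List (List Char)) (ln : List Char) :
    List (List (List Char)) × List (List Char) :=
  if PySem.Chars.startswith ln "|".toList then (st.1, st.2 ++ [ln])
  else if st.2 ≠ [] then (st.1 ++ [st.2], []) else st

def count_pipe_data_rows_py_alt (compressed_text : String) : Int :=
  let lines := (PySem.Chars.splitOn compressed_text.toList "\n".toList).map PySem.Chars.strip
  let st := lines.foldl pvStepRuns ([], [])
  let runs := if st.2 ≠ [] then st.1 ++ [st.2] else st.1
  runs.foldl (fun t run => t + pvRunCount run) 0

-- ===== PRECONDITION & SPEC =====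
def Spec_count_pipe_data_rows_py (compressed_text : String) (out : Int) : Prop := out = count_pipe_data_rows_py_alt compressed_text
instance (compressed_text : String) (out : Int) : Decidable (Spec_count_pipe_data_rows_py compressed_text out) := by unfold Spec_count_pipe_data_rows_py; infer_instance

-- ===== CLAIM (what is proved, stated in full; the proofs are below) =====
def Claim_equal_count_pipe_data_rows_py : Prop := ∀ (compressed_text : String), Dom_count_pipe_data_rows_py compressed_text → Spec_count_pipe_data_rows_py compressed_text (count_pipe_data_rows_py compressed_text)

-- ===== LEMMAS AND PROOFS =====

-- common abbreviations for the proofs (char-list normal forms of the string tests)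
def pvPipe (s : List Char) : Bool := PySem.Chars.startswith s ['|']
def pvSep (s : List Char) : Bool := PySem.Chars.startswith s ['|', '-', '-', '-']
def pvGood (s : List Char) : Bool :=
  !(PySem.Chars.startswith s ['|', '|']) && !(PySem.Chars.startswith s ['|', '-', '-', '-'])

-- the reference state machine both ports reduce to (A's branch structure, on stripped lines)
def pvF (b : Bool) : List (List Char) → Int
  | [] => 0
  | s :: rest =>
    if pvSep s then pvF true rest
    else if b then
      if pvPipe s then (if pvGood s then 1 + pvF b rest else pvF b rest)
      else pvF false rest
    else pvF b rest

theorem pipe_of_sep {s : List Char} (h : pvSep s = true) : pvPipe s = true := by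
  unfold pvSep at h; unfold pvPipe
  rw [PySem.Chars.startswith_iff] at h ⊢
  exact List.IsPrefix.trans (by decide) h

theorem ne_nil_of_pipe {s : List Char} (h : pvPipe s = true) : s ≠ [] := by
  unfold pvPipe at h
  rw [PySem.Chars.startswith_iff] at h
  rcases h with ⟨t, ht⟩
  intro hn; simp [hn] at ht

theorem nonsep_of_nonpipe {s : List Char} (h : pvPipe s = false) : pvSep s = false := by
  cases hq : pvSep s
  · rfl
  · exact absurd (pipe_of_sep hq) (by simp [h])

-- ===== A side: the fold equals the reference machine =====
theorem foldl_stepA_eq : ∀ (ls : List (List Char)) (t : Int) (b : Bool),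
    (ls.foldl pvStepA (t, b)).1 = t + pvF b (ls.map PySem.Chars.strip) := by
  intro ls
  induction ls with
  | nil => intro t b; simp [pvF]
  | cons l rest ih =>
    intro t b
    simp only [List.foldl_cons, List.map_cons]
    set s := PySem.Chars.strip l with hs
    cases h1 : pvSep s with
    | true =>
      unfold pvSep at h1
      simp [pvStepA, ← hs, pvF, pvSep, h1, ih]
    | false =>
      unfold pvSep at h1
      cases hp : pvPipe s with
      | false =>
        unfold pvPipe at hp
        cases b <;> simp [pvStepA, ← hs, pvF, pvSep, pvPipe, h1, hp, ih]
      | true =>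
        unfold pvPipe at hp
        have hne := ne_nil_of_pipe (s := s) (by unfold pvPipe; exact hp)
        cases b
        · simp [pvStepA, ← hs, pvF, pvSep, pvPipe, h1, hp, ih]
        · cases hd : PySem.Chars.startswith s ['|', '|'] with
          | false =>
            have hg : pvGood s = true := by unfold pvGood; simp [hd, h1]
            simp [pvStepA, ← hs, pvF, pvSep, pvPipe, h1, hp, hne, hd, hg, ih]
            ring
          | true =>
            have hg : pvGood s = false := by unfold pvGood; simp [hd]
            simp [pvStepA, ← hs, pvF, pvSep, pvPipe, h1, hp, hne, hd, hg, ih]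

-- ===== B side =====
theorem runCount_nil : pvRunCount [] = 0 := by simp [pvRunCount, pvFirstSepIdx]

theorem runCount_cons_sep {c : List Char} (cur : List (List Char)) (h : pvSep c = true) :
    pvRunCount (c :: cur) = (cur.countP pvGood : Int) := by
  have h' : PySem.Chars.startswith c "|---".toList = true := h
  simp only [pvRunCount, pvFirstSepIdx, h', if_true, Nat.cast_zero, zero_add,
    PySem.List.slice_from_one, List.tail_cons]
  rfl

theorem runCount_cons_nonsep {c : List Char} (cur : List (List Char)) (h : pvSep c = false) :
    pvRunCount (c :: cur) = pvRunCount cur := by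
  have h' : PySem.Chars.startswith c "|---".toList = false := h
  simp only [pvRunCount, pvFirstSepIdx, h', Bool.false_eq_true, if_false]
  cases hk : pvFirstSepIdx cur with
  | none => simp
  | some k =>
    simp only [hk, Option.map_some]
    have h2 : ((k : Int) + 1) = (((k + 1 : Nat) : Int)) := by push_cast; ring
    have h1 : ((((k + 1 : Nat) : Nat) : Int) + 1) = (((k + 2 : Nat) : Int)) := by push_cast; ring
    rw [h2, h1, PySem.List.slice_from_natCast, PySem.List.slice_from_natCast, List.drop_succ_cons]

-- rewriting pvStepRuns by the pipe test
theorem stepRuns_pipe {ln : List Char} (st : List (List (List Char)) × List (List Char))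
    (h : pvPipe ln = true) : pvStepRuns st ln = (st.1, st.2 ++ [ln]) := by
  unfold pvPipe at h; simp [pvStepRuns, h]

theorem stepRuns_nonpipe_ne {ln : List Char} (st : List (List (List Char)) × List (List Char))
    (h : pvPipe ln = false) (hc : st.2 ≠ []) : pvStepRuns st ln = (st.1 ++ [st.2], []) := by
  unfold pvPipe at h; simp [pvStepRuns, h, hc]

theorem stepRuns_nonpipe_nil {ln : List Char} (st : List (List (List Char)) × List (List Char))
    (h : pvPipe ln = false) (hc : st.2 = []) : pvStepRuns st ln = st := by
  unfold pvPipe at h; simp [pvStepRuns, h, hc]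

-- the machine in data mode over an all-pipe block
theorem pvF_true_block : ∀ (xs : List (List Char)),
    (∀ x ∈ xs, pvPipe x = true) →
    (∀ tail : List (List Char), (tail = [] ∨ ∃ l rest, tail = l :: rest ∧ pvPipe l = false) →
      pvF true (xs ++ tail) = (xs.countP pvGood : Int) + pvF false tail) := by
  intro xs
  induction xs with
  | nil =>
    intro _ tail htail
    rcases htail with rfl | ⟨l, rest, rfl, hl⟩
    · simp [pvF]
    · simp [pvF, nonsep_of_nonpipe hl, hl]
  | cons x xs ih =>
    intro hall tail htail
    have hx := hall x (by simp)
    have ih' := ih (fun y hy => hall y (by simp [hy])) tail htail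
    by_cases hs : pvSep x = true
    · have hg : pvGood x = false := by
        unfold pvGood; unfold pvSep at hs; simp [hs]
      simp [pvF, hs, hx, ih', List.countP_cons, hg]
    · simp only [Bool.not_eq_true] at hs
      by_cases hg : pvGood x = true
      · simp [pvF, hs, hx, hg, ih', List.countP_cons]
        push_cast; ring
      · simp only [Bool.not_eq_true] at hg
        simp [pvF, hs, hx, hg, ih', List.countP_cons]

-- the machine from idle mode over an all-pipe block equals the per-run count
theorem pvF_false_block : ∀ (cur : List (List Char)),
    (∀ x ∈ cur, pvPipe x = true) →
    (∀ tail : List (List Char), (tail = [] ∨ ∃ l rest, tail = l :: rest ∧ pvPipe l = false) →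
      pvF false (cur ++ tail) = pvRunCount cur + pvF false tail) := by
  intro cur
  induction cur with
  | nil =>
    intro _ tail htail
    rcases htail with rfl | ⟨l, rest, rfl, hl⟩
    · simp [pvF, runCount_nil]
    · simp [pvF, nonsep_of_nonpipe hl, hl, runCount_nil]
  | cons c cur ih =>
    intro hall tail htail
    have hc := hall c (by simp)
    have hall' : ∀ x ∈ cur, pvPipe x = true := fun y hy => hall y (by simp [hy])
    by_cases hs : pvSep c = true
    · rw [runCount_cons_sep cur hs]
      simp only [List.cons_append, pvF, hs, if_true]
      rw [pvF_true_block cur hall' tail htail]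
    · simp only [Bool.not_eq_true] at hs
      rw [runCount_cons_nonsep cur hs]
      simp only [List.cons_append, pvF, hs, Bool.false_eq_true, if_false, hc, if_true]
      exact ih hall' tail htail

theorem sum_runs_append (rs : List (List (List Char))) (c : List (List Char)) (t : Int) :
    (rs ++ [c]).foldl (fun t run => t + pvRunCount run) t =
      rs.foldl (fun t run => t + pvRunCount run) t + pvRunCount c := by
  simp [List.foldl_append]

-- B's staged computation equals the reference machine
theorem foldl_stepRuns_eq : ∀ (ls : List (List Char)) (rs : List (List (List Char)))
    (cur : List (List Char)) (t : Int), (∀ x ∈ cur, pvPipe x = true) →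
    (if (ls.foldl pvStepRuns (rs, cur)).2 ≠ [] then
        (ls.foldl pvStepRuns (rs, cur)).1 ++ [(ls.foldl pvStepRuns (rs, cur)).2]
      else (ls.foldl pvStepRuns (rs, cur)).1).foldl (fun t run => t + pvRunCount run) t =
      rs.foldl (fun t run => t + pvRunCount run) t + pvF false (cur ++ ls) := by
  intro ls
  induction ls with
  | nil =>
    intro rs cur t hall
    by_cases hc : cur = []
    · subst hc; simp [pvF, runCount_nil]
    · simp only [List.foldl_nil, List.append_nil, hc, ne_eq, not_false_iff, if_true]
      rw [sum_runs_append]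
      have hb := pvF_false_block cur hall [] (Or.inl rfl)
      simp [pvF] at hb
      rw [hb]
  | cons l rest ih =>
    intro rs cur t hall
    simp only [List.foldl_cons]
    cases hp : pvPipe l with
    | true =>
      rw [stepRuns_pipe _ hp]
      have hall' : ∀ x ∈ cur ++ [l], pvPipe x = true := by
        intro y hy; rcases List.mem_append.1 hy with h | h
        · exact hall y h
        · simp at h; subst h; exact hp
      rw [ih rs (cur ++ [l]) t hall']
      simp [List.append_assoc]
    | false =>
      have htail : (l :: rest) = [] ∨ ∃ l' rest', l :: rest = l' :: rest' ∧ pvPipe l' = false :=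
        Or.inr ⟨l, rest, rfl, hp⟩
      have hblock := pvF_false_block cur hall (l :: rest) htail
      have hs := nonsep_of_nonpipe hp
      by_cases hc : cur = []
      · subst hc
        rw [stepRuns_nonpipe_nil _ hp rfl]
        rw [ih rs [] t (by simp)]
        have h3 : pvF false ([] ++ l :: rest) = pvF false rest := by simp [pvF, hs]
        rw [h3]
        simp
      · rw [stepRuns_nonpipe_ne _ hp hc]
        rw [ih (rs ++ [cur]) [] t (by simp)]
        rw [hblock, sum_runs_append]
        have h2 : pvF false ([] ++ rest) = pvF false (l :: rest) := by
          simp [pvF, hs, hp]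
        rw [h2]
        ring

-- ===== VERDICT (by name: the statement is the Claim_ definition above) =====
theorem count_pipe_data_rows_py_spec : Claim_equal_count_pipe_data_rows_py := by
  intro t _
  unfold Spec_count_pipe_data_rows_py count_pipe_data_rows_py count_pipe_data_rows_py_alt
  rw [foldl_stepA_eq]
  have := foldl_stepRuns_eq
    ((PySem.Chars.splitOn t.toList "\n".toList).map PySem.Chars.strip) [] [] 0 (by simp)
  simp only [List.nil_append, List.foldl_nil] at this
  simp only [this, zero_add]
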